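-- pv_equiv track=rewrite | github.com/nannasvei/ikea_50 | app.py | alg_largest_smallest
-- ===== SOURCE A (Python) =====
-- from itertools import combinations, combinations_with_replacement
--
-- def assign_remainders_to_groups(groups, remainders):
--     if not groups:
--         return []
--     for r in remainders:
--         target = min(groups, key=lambda g: sum(g))
--         target.append(r)
--     return groups
--
-- def finalize_groups(nums, groups, limit):
--     nums_all = nums[:]
--     valid = [g[:] for g in groups if sum(g) >= limit]
--
--     if not nums_all:
--         return []
--
--     if not valid:
--         return [nums_all]
--
--     remaining = nums_all[:]
--     for g in valid:
--         for x in g: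
--             if x in remaining:
--                 remaining.remove(x)
--
--     assign_remainders_to_groups(valid, remaining)
--     return valid
--
-- def alg_largest_smallest(nums, limit):
--     nums_sorted = sorted(nums, reverse=True)
--     unused = nums_sorted[:]
--     groups = []
--
--     while unused:
--         largest = unused[0]
--         others = unused[1:]
--         group = [largest]
--         added = False
--
--         smalls = sorted(others)
--         for s in smalls:
--             if largest + s >= limit:
--                 group.append(s)
--                 added = True
--                 break
--
--         if not added:
--             for a, b in combinations(smalls, 2):
--                 if largest + a + b >= limit:
--                     group.extend([a, b])
--                     added = True
--                     break
--
--         if not added: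
--             break
--
--         for x in group:
--             unused.remove(x)
--
--         groups.append(group)
--
--     return finalize_groups(nums, groups, limit)
-- ===== SOURCE B (Python) =====
-- from bisect import bisect_left
-- from itertools import combinations, combinations_with_replacement  # same module imports as A (unused here)
--
--
-- def alg_largest_smallest(nums, limit):
--     # Keep the unused pool as one ascending sorted list; find the smallest
--     # feasible partner (and the lexicographically first feasible pair) by
--     # binary search instead of linear / pairwise scans.
--     asc = sorted(nums)
--     groups = []
--     while asc:
--         largest = asc.pop()
--         need = limit - largest
--         n = len(asc)
--         j = bisect_left(asc, need)
--         if j < n: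
--             group = [largest, asc[j]]
--             del asc[j]
--         else:
--             group = None
--             for i, a in enumerate(asc):
--                 k = bisect_left(asc, need - a, i + 1)
--                 if k < n:
--                     group = [largest, a, asc[k]]
--                     del asc[k]
--                     del asc[i]
--                     break
--             if group is None:
--                 break
--         groups.append(group)
--
--     # finalize (same policy as the original: groups meeting the limit are
--     # kept; leftovers are assigned to the currently lightest group)
--     valid = [g[:] for g in groups if sum(g) >= limit]
--     if not nums:
--         return []
--     if not valid:
--         return [nums[:]]
--
--     used = {}
--     for g in valid:
--         for x in g:
--             used[x] = used.get(x, 0) + 1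
--     remaining = []
--     for x in nums:
--         if used.get(x, 0) > 0:
--             used[x] -= 1
--         else:
--             remaining.append(x)
--
--     for r in remaining:
--         target = min(valid, key=lambda g: sum(g))
--         target.append(r)
--     return valid
-- ===== Notes on version B (the rewrite author's own statement) =====
-- stated objective: faster
-- what changed: B keeps the pool as one ascending sorted list and finds the smallest feasible partner (and the lexicographically first feasible pair) with bisect instead of re-sorting each round and scanning linearly / over all combinations, and computes the leftovers with a counting dict in one pass over nums instead of repeated list.remove scans.
import Mathlib
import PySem

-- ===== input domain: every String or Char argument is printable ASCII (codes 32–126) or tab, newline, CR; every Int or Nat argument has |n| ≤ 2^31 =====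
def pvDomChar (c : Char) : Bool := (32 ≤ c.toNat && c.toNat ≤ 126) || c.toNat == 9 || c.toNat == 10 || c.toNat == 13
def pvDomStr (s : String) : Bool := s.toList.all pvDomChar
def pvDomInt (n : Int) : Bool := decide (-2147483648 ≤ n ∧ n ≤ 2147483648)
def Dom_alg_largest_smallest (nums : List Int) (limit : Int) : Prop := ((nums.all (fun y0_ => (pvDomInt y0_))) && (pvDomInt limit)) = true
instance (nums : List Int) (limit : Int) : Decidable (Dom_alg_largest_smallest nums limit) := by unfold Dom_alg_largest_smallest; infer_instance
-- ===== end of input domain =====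

-- B keeps the pool as ONE ascending sorted list and finds the smallest feasible partner
-- (and the lexicographically first feasible pair) by binary search (bisect) instead of
-- re-sorting and scanning linearly / over all pairs each round, and collects the leftover
-- elements with a counting dict in one pass instead of repeated list.remove scans (faster).
-- Neither implementation mutates its arguments; return values only.

-- ===== PORT A =====
-- list.remove(x) inside the loops: x is always a member there, so the total form is exact
def pvRemove (u : List Int) (x : Int) : List Int := (PySem.List.remove? u x).getD u

-- Python's min(groups, key=sum) returns the FIRST minimal-sum group object; the loop then
-- appends to that object in place.  We locate that object by its index and update it there.
def pvMinIdx (gs : List (List Int)) : Nat :=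
  match PySem.List.min? gs (fun g => g.sum) with
  | none => 0
  | some m => gs.findIdx (fun g => g.sum == m.sum)

-- assign_remainders_to_groups (shared tail: the same loop appears verbatim in A and in B)
def pvAssign (groups : List (List Int)) (remainders : List Int) : List (List Int) :=
  if groups.isEmpty then []
  else remainders.foldl (fun gs r =>
    let i := pvMinIdx gs
    gs.set i (gs.getD i [] ++ [r])) groups

-- finalize_groups
def pvFinalizeA (nums : List Int) (groups : List (List Int)) (limit : Int) : List (List Int) :=
  let valid := groups.filter (fun g => decide (limit ≤ g.sum))
  if nums.isEmpty then []
  else if valid.isEmpty then [nums]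
  else
    let remaining := valid.foldl (fun rem g =>
      g.foldl (fun rem x => if x ∈ rem then pvRemove rem x else rem) rem) nums
    pvAssign valid remaining

-- the while loop; fuel = len(nums) bounds the iteration count (≥ 2 elements leave `unused` per round)
def loopA (limit : Int) : Nat → List Int → List (List Int) → List (List Int)
  | 0, _, groups => groups
  | _ + 1, [], groups => groups
  | fuel + 1, largest :: others, groups =>
    let smalls := PySem.List.sorted others (fun x => x)
    match smalls.find? (fun s => decide (limit ≤ largest + s)) with
    | some s =>
        let group := [largest, s]
        loopA limit fuel (group.foldl (fun u x => pvRemove u x) (largest :: others)) (groups ++ [group])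
    | none =>
      match (PySem.List.combinations smalls 2).find? (fun ab => decide (limit ≤ largest + ab.sum)) with
      | some ab =>
          let group := largest :: ab
          loopA limit fuel (group.foldl (fun u x => pvRemove u x) (largest :: others)) (groups ++ [group])
      | none => groups

def alg_largest_smallest (nums : List Int) (limit : Int) : List (List Int) :=
  let numsSorted := PySem.List.sorted nums (fun x => x) true
  pvFinalizeA nums (loopA limit nums.length numsSorted []) limit

-- ===== PORT B =====
-- inner `for i, a in enumerate(asc)` with `k = bisect_left(asc, need - a, i + 1)`:
-- t is the suffix asc[i+1:], so i + 1 + bisectLeft t v is exactly bisect_left(asc, v, i+1)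
def pairScan (n : Nat) (need : Int) : Nat → List Int → Option (Nat × Int × Nat)
  | _, [] => none
  | i, a :: t =>
    let k := i + 1 + PySem.List.bisectLeft t (need - a)
    if k < n then some (i, a, k) else pairScan n need (i + 1) t

def loopB (limit : Int) : Nat → List Int → List (List Int) → List (List Int)
  | 0, _, groups => groups
  | fuel + 1, asc, groups =>
    match asc.getLast? with
    | none => groups
    | some largest =>
      let rest := asc.dropLast
      let need := limit - largest
      let j := PySem.List.bisectLeft rest need
      if j < rest.length then
        loopB limit fuel (rest.eraseIdx j) (groups ++ [[largest, rest.getD j 0]])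
      else
        match pairScan rest.length need 0 rest with
        | some (i, a, k) =>
            loopB limit fuel ((rest.eraseIdx k).eraseIdx i) (groups ++ [[largest, a, rest.getD k 0]])
        | none => groups

def pvFinalizeB (nums : List Int) (groups : List (List Int)) (limit : Int) : List (List Int) :=
  let valid := groups.filter (fun g => decide (limit ≤ g.sum))
  if nums.isEmpty then []
  else if valid.isEmpty then [nums]
  else
    let used := valid.foldl (fun d g => g.foldl (fun d x => d.modify x 0 (· + 1)) d)
      (PySem.Dict.empty : PySem.Dict Int Int)
    let remaining := (nums.foldl (fun (st : PySem.Dict Int Int × List Int) x =>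
        if 0 < st.1.getD x 0 then (st.1.insert x (st.1.getD x 0 - 1), st.2)
        else (st.1, st.2 ++ [x])) (used, ([] : List Int))).2
    pvAssign valid remaining

def alg_largest_smallest_alt (nums : List Int) (limit : Int) : List (List Int) :=
  let asc := PySem.List.sorted nums (fun x => x)
  pvFinalizeB nums (loopB limit nums.length asc []) limit

-- ===== PRECONDITION & SPEC =====
def Spec_alg_largest_smallest (nums : List Int) (limit : Int) (out : List (List Int)) : Prop := out = alg_largest_smallest_alt nums limit
instance (nums : List Int) (limit : Int) (out : List (List Int)) : Decidable (Spec_alg_largest_smallest nums limit out) := by unfold Spec_alg_largest_smallest; infer_instance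

-- ===== CLAIM (what is proved, stated in full; the proofs are below) =====
def Claim_equal_alg_largest_smallest : Prop := ∀ (nums : List Int) (limit : Int), Dom_alg_largest_smallest nums limit → Spec_alg_largest_smallest nums limit (alg_largest_smallest nums limit)

-- ===== LEMMAS AND PROOFS =====

-- python list.remove with a membership guard is List.erase, unconditionally
theorem pvRemove_eq_erase (u : List Int) (x : Int) : pvRemove u x = u.erase x := by
  by_cases h : x ∈ u
  · rw [pvRemove, PySem.List.remove?_eq_some_erase u x h]; rfl
  · rw [pvRemove, (PySem.List.remove?_eq_none_iff u x).mpr h, List.erase_of_not_mem h]; rfl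

-- a ≥-sorted permutation of l.reverse (l ≤-sorted) is l.reverse
theorem desc_eq {l d : List Int} (hp : d.Perm l.reverse)
    (hl : l.Pairwise (· ≤ ·)) (hd : d.Pairwise (fun a b => b ≤ a)) : d = l.reverse := by
  have h1 : d.reverse = l := by
    apply PySem.List.eq_of_perm_of_pairwise_le_of_injective (fun x : Int => x)
      (fun a b h => h)
    · exact ((List.reverse_perm d).trans hp).trans (List.reverse_perm l)
    · exact List.pairwise_reverse.mpr hd
    · exact hl
  calc d = d.reverse.reverse := (List.reverse_reverse d).symm
    _ = l.reverse := by rw [h1]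

-- sorted(xs, reverse=True) = reverse of sorted(xs)
theorem sortedDesc_eq (nums : List Int) :
    PySem.List.sorted nums (fun x => x) true = (PySem.List.sorted nums (fun x => x)).reverse := by
  apply desc_eq
  · exact (PySem.List.sorted_perm nums _ true).trans (PySem.List.sorted_perm nums _ false).symm |>.trans
      (List.reverse_perm _).symm
  · exact PySem.List.sorted_pairwise nums (fun x => x)
  · exact PySem.List.sorted_pairwise_rev nums (fun x => x)

-- sorting the reverse of an already ascending list gives it back
theorem sorted_reverse_self (l : List Int) (h : l.Pairwise (· ≤ ·)) :
    PySem.List.sorted l.reverse (fun x => x) = l := by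
  apply PySem.List.eq_of_perm_of_pairwise_le_of_injective (fun x : Int => x) (fun a b hh => hh)
  · exact (PySem.List.sorted_perm _ _ false).trans (List.reverse_perm l)
  · exact PySem.List.sorted_pairwise _ _
  · exact h

-- the first linear match of a threshold predicate on a sorted list IS bisect_left
theorem find_ge_bisect (l : List Int) (c : Int) (hs : l.Pairwise (· ≤ ·)) :
    l.find? (fun s => decide (c ≤ s)) =
      if h : PySem.List.bisectLeft l c < l.length
      then some l[PySem.List.bisectLeft l c] else none := by
  obtain ⟨hle, hlt, hge⟩ := PySem.List.bisectLeft_spec l c hs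
  set j := PySem.List.bisectLeft l c with hj
  split
  · next h =>
    rw [List.find?_eq_some_iff_append]
    refine ⟨by simpa using hge j h le_rfl, l.take j, l.drop (j+1), ?_, ?_⟩
    · conv_lhs => rw [← List.take_append_drop j l]
      rw [List.drop_eq_getElem_cons h]
    · intro a ha
      obtain ⟨k, hk, hka⟩ := List.mem_take_iff_getElem.mp ha
      have := hlt k (by omega) (by omega)
      simp only [Bool.not_eq_eq_eq_not, Bool.not_true, decide_eq_false_iff_not, not_le]
      omega
  · next h =>
    rw [List.find?_eq_none]
    intro x hx
    obtain ⟨k, hk, hkx⟩ := List.mem_iff_getElem.mp hx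
    have := hlt k hk (by omega)
    simp only [decide_eq_true_eq, not_le]
    omega

-- the first feasible pair of combinations(t, 2) IS the bisect pair scan
theorem pairScan_spec (need : Int) : ∀ (t : List Int) (i : Nat) (full : List Int),
    t.Pairwise (· ≤ ·) → full.drop i = t →
    ((PySem.List.combinations t 2).find? (fun ab => decide (need ≤ ab.sum)) =
       (pairScan full.length need i t).map (fun r => [r.2.1, full.getD r.2.2 0]))
    ∧ (∀ i' a k, pairScan full.length need i t = some (i', a, k) →
         i' < k ∧ k < full.length ∧ full[i']? = some a) := by
  intro t
  induction t with
  | nil =>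
    intro i full _ _
    constructor
    · simp [PySem.List.combinations_nil_succ, pairScan]
    · intro i' a k h; simp [pairScan] at h
  | cons a t' ih =>
    intro i full hp hdrop
    have hlen : full.length = i + 1 + t'.length := by
      have h1 := congrArg List.length hdrop
      simp [List.length_drop] at h1
      omega
    have hdrop' : full.drop (i+1) = t' := by
      have h2 : (full.drop i).tail = t' := by rw [hdrop]; rfl
      rw [← h2, List.tail_drop]
    have hai : full[i]? = some a := by rw [← List.head?_drop, hdrop]; rfl
    have hbl := (PySem.List.bisectLeft_spec t' (need - a) hp.of_cons).1
    have hpred : ((fun ab : List Int => decide (need ≤ ab.sum)) ∘ (fun c => a :: c) ∘ fun x => [x])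
        = (fun b : Int => decide (need - a ≤ b)) := by
      funext b
      simp only [Function.comp_apply, List.sum_cons, List.sum_nil, decide_eq_decide]
      omega
    rw [PySem.List.combinations_cons_succ, PySem.List.combinations_one, List.find?_append,
      List.map_map, List.find?_map, hpred, find_ge_bisect t' (need - a) hp.of_cons,
      (rfl : (1:Nat) + 1 = 2)]
    by_cases h : PySem.List.bisectLeft t' (need - a) < t'.length
    · rw [dif_pos h]
      have hk : i + 1 + PySem.List.bisectLeft t' (need - a) < full.length := by omega
      have hkget : full[i + 1 + PySem.List.bisectLeft t' (need - a)]?.getD 0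
          = t'[PySem.List.bisectLeft t' (need - a)] := by
        rw [← List.getElem?_drop, hdrop']
        simp [h]
      constructor
      · simp only [pairScan, if_pos hk, Option.map_some]
        rw [List.getD, hkget]
        simp
      · intro i' a' k hsome
        simp only [pairScan, if_pos hk, Option.some_inj, Prod.mk.injEq] at hsome
        obtain ⟨h1, h2, h3⟩ := hsome
        subst h1; subst h2; subst h3
        exact ⟨by omega, hk, hai⟩
    · rw [dif_neg h]
      have hk : ¬ (i + 1 + PySem.List.bisectLeft t' (need - a) < full.length) := by omega
      have := ih (i+1) full hp.of_cons hdrop'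
      constructor
      · simp only [pairScan, if_neg hk, Option.map_none, Option.none_or]
        exact this.1
      · intro i' a' k hsome
        simp only [pairScan, if_neg hk] at hsome
        exact this.2 i' a' k hsome

-- the two while loops agree (A's pool is the reverse of B's)
theorem loop_eq (limit : Int) : ∀ (fuel : Nat) (asc : List Int) (groups : List (List Int)),
    asc.Pairwise (· ≤ ·) →
    loopA limit fuel asc.reverse groups = loopB limit fuel asc groups := by
  intro fuel
  induction fuel with
  | zero => intro asc groups _; rfl
  | succ fuel ih =>
    intro asc groups hp
    by_cases hnil : asc = []
    · subst hnil; rfl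
    · have hrev : asc.reverse = asc.getLast hnil :: asc.dropLast.reverse := by
        conv_lhs => rw [← List.dropLast_append_getLast hnil]
        simp
      set l := asc.getLast hnil with hl
      set rest := asc.dropLast with hrestdef
      have hrest : rest.Pairwise (· ≤ ·) := List.Pairwise.sublist (List.dropLast_sublist asc) hp
      have hrestrev : rest.reverse.Pairwise (fun a b => b ≤ a) := List.pairwise_reverse.mpr hrest
      have hlast : asc.getLast? = some l := List.getLast?_eq_some_getLast hnil
      have hpred1 : (fun s : Int => decide (limit ≤ l + s)) = (fun s => decide (limit - l ≤ s)) := by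
        funext s; rw [decide_eq_decide]; omega
      rw [hrev]
      simp only [loopA, loopB, hlast, sorted_reverse_self rest hrest, hpred1,
        find_ge_bisect rest (limit - l) hrest]
      simp only [← hrestdef]
      by_cases hj : PySem.List.bisectLeft rest (limit - l) < rest.length
      · rw [dif_pos hj, if_pos hj]
        have hgetD : rest.getD (PySem.List.bisectLeft rest (limit - l)) 0
            = rest[PySem.List.bisectLeft rest (limit - l)] := List.getD_eq_getElem rest 0 hj
        have key : rest.reverse.erase rest[PySem.List.bisectLeft rest (limit - l)]
            = (rest.eraseIdx (PySem.List.bisectLeft rest (limit - l))).reverse := by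
          apply desc_eq
          · exact ((List.Perm.erase _ (List.reverse_perm rest)).trans
              (List.erase_getElem hj)).trans (List.reverse_perm _).symm
          · exact List.Pairwise.sublist (List.eraseIdx_sublist rest _) hrest
          · exact List.Pairwise.sublist List.erase_sublist hrestrev
        simp only [List.foldl, pvRemove_eq_erase, List.erase_cons_head, hgetD, key]
        rw [← hgetD]
        exact ih _ _ (List.Pairwise.sublist (List.eraseIdx_sublist rest _) hrest)
      · rw [dif_neg hj, if_neg hj]
        have hpred2 : (fun ab : List Int => decide (limit ≤ l + ab.sum))
            = (fun ab => decide (limit - l ≤ ab.sum)) := by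
          funext ab; rw [decide_eq_decide]; omega
        obtain ⟨hfind2, hbounds⟩ := pairScan_spec (limit - l) rest 0 rest hrest (by simp)
        rw [hpred2, hfind2]
        cases hscan : pairScan rest.length (limit - l) 0 rest with
        | none => rfl
        | some r =>
          obtain ⟨i, a, k⟩ := r
          obtain ⟨hik, hkl, hia⟩ := hbounds i a k hscan
          obtain ⟨hil, ha⟩ := List.getElem?_eq_some_iff.mp hia
          have hb : rest.getD k 0 = rest[k] := List.getD_eq_getElem rest 0 hkl
          have hil' : i < (rest.eraseIdx k).length := by
            rw [List.length_eraseIdx]; simp [hkl]; omega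
          have hgi : (rest.eraseIdx k)[i] = a := by
            rw [List.getElem_eraseIdx]; simp [hik, ha]
          have key2 : (rest.reverse.erase a).erase (rest.getD k 0)
              = ((rest.eraseIdx k).eraseIdx i).reverse := by
            apply desc_eq
            · have p1 : ((rest.reverse.erase a).erase (rest.getD k 0)).Perm
                  ((rest.erase (rest.getD k 0)).erase a) := by
                rw [List.erase_comm]
                exact List.Perm.erase _ (List.Perm.erase _ (List.reverse_perm rest))
              have p2 : ((rest.erase (rest.getD k 0)).erase a).Perm
                  ((rest.eraseIdx k).erase a) := by
                rw [hb]
                exact List.Perm.erase _ (List.erase_getElem hkl)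
              have p3 : ((rest.eraseIdx k).erase a).Perm ((rest.eraseIdx k).eraseIdx i) := by
                rw [← hgi]
                exact List.erase_getElem hil'
              exact ((p1.trans p2).trans p3).trans (List.reverse_perm _).symm
            · exact List.Pairwise.sublist ((List.eraseIdx_sublist _ i).trans
                (List.eraseIdx_sublist rest k)) hrest
            · exact List.Pairwise.sublist (List.erase_sublist.trans List.erase_sublist) hrestrev
          simp only [Option.map_some, List.foldl, pvRemove_eq_erase, List.erase_cons_head, key2]
          exact ih _ _ (List.Pairwise.sublist ((List.eraseIdx_sublist _ i).trans
            (List.eraseIdx_sublist rest k)) hrest)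

-- A's remaining-loop is list difference
theorem guarded_step_eq_erase :
    (fun (rem : List Int) (x : Int) => if x ∈ rem then pvRemove rem x else rem) = List.erase := by
  funext rem x
  by_cases h : x ∈ rem
  · rw [if_pos h, pvRemove_eq_erase]
  · rw [if_neg h, List.erase_of_not_mem h]

theorem removeAll_eq_diff : ∀ (gs : List (List Int)) (r : List Int),
    gs.foldl (fun rem g =>
      g.foldl (fun rem x => if x ∈ rem then pvRemove rem x else rem) rem) r = r.diff gs.flatten := by
  intro gs
  induction gs with
  | nil => intro r; simp
  | cons g gs ih =>
    intro r
    rw [List.foldl_cons, ih, List.flatten_cons, List.diff_append, guarded_step_eq_erase,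
      ← List.diff_eq_foldl]

-- B's counting dict holds the multiplicities of the grouped elements
theorem usedCount (gs : List (List Int)) :
    ∀ (d : PySem.Dict Int Int) (x : Int),
    (gs.foldl (fun d g => g.foldl (fun d x => d.modify x 0 (· + 1)) d) d).getD x 0
      = d.getD x 0 + (gs.flatten.count x : Int) := by
  induction gs with
  | nil => intro d x; simp
  | cons g gs ih =>
    intro d x
    rw [List.foldl_cons, ih, PySem.Dict.getD_foldl_modify_add_one, List.flatten_cons,
      List.count_append]
    push_cast
    ring

-- B's one-pass counter filter is list difference
theorem remLoop_eq_diff : ∀ (r : List Int) (d : PySem.Dict Int Int) (L : List Int) (acc : List Int),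
    (∀ x, d.getD x 0 = (L.count x : Int)) →
    (r.foldl (fun (st : PySem.Dict Int Int × List Int) x =>
        if 0 < st.1.getD x 0 then (st.1.insert x (st.1.getD x 0 - 1), st.2)
        else (st.1, st.2 ++ [x])) (d, acc)).2 = acc ++ r.diff L := by
  intro r
  induction r with
  | nil => intro d L acc _; simp
  | cons x t ih =>
    intro d L acc hc
    rw [List.foldl_cons]
    by_cases hmem : x ∈ L
    · have hpos : 0 < d.getD x 0 := by rw [hc x]; exact_mod_cast List.count_pos_iff.mpr hmem
      rw [if_pos hpos]
      have hcount : ∀ y, (d.insert x (d.getD x 0 - 1)).getD y 0 = ((L.erase x).count y : Int) := by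
        intro y
        by_cases hy : y = x
        · subst hy
          rw [PySem.Dict.getD_insert_self, hc y, List.count_erase_self]
          have := List.count_pos_iff.mpr hmem
          omega
        · rw [PySem.Dict.getD_insert_of_ne _ _ _ hy, hc y, List.count_erase_of_ne hy]
      rw [ih _ _ _ hcount, List.cons_diff, if_pos hmem]
    · have hz : ¬ 0 < d.getD x 0 := by
        rw [hc x]
        simp [List.count_eq_zero_of_not_mem hmem]
      rw [if_neg hz, ih _ _ _ hc, List.cons_diff, if_neg hmem, List.append_assoc,
        List.singleton_append]

theorem finalize_eq (nums : List Int) (G : List (List Int)) (limit : Int) :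
    pvFinalizeA nums G limit = pvFinalizeB nums G limit := by
  rw [pvFinalizeA, pvFinalizeB]
  split_ifs with h1 h2
  · rfl
  · rfl
  · dsimp only
    rw [removeAll_eq_diff, remLoop_eq_diff _ _ (G.filter (fun g => decide (limit ≤ g.sum))).flatten []
      (fun x => by rw [usedCount]; simp), List.nil_append]

-- ===== VERDICT (by name: the statement is the Claim_ definition above) =====
theorem alg_largest_smallest_spec : Claim_equal_alg_largest_smallest := by
  intro nums limit _
  show alg_largest_smallest nums limit = alg_largest_smallest_alt nums limit
  rw [alg_largest_smallest, alg_largest_smallest_alt, sortedDesc_eq,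
    loop_eq limit nums.length _ [] (PySem.List.sorted_pairwise nums (fun x => x)),
    finalize_eq]
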